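-- pv_equiv track=rewrite | github.com/Steven-Mendez/starter-template-fastapi | src/app_platform/tests/unit/observability/test_metrics.py | _parse_metric_names
-- ===== SOURCE A (Python) =====
-- def _parse_metric_names(prom_text: str) -> set[str]:
--     """Return the set of metric names referenced in a Prometheus exposition.
--
--     Lines look like::
--
--         # HELP app_auth_logins_total Total login attempts ...
--         # TYPE app_auth_logins_total counter
--         app_auth_logins_total{result="success"} 1.0
--
--     The metric name is the leading token before ``{`` or whitespace on
--     sample lines (no leading ``#``).
--     """
--     names: set[str] = set()
--     for raw in prom_text.splitlines():
--         line = raw.strip()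
--         if not line or line.startswith("#"):
--             continue
--         # Split off labels and value.
--         head = line.split("{", 1)[0].split(" ", 1)[0]
--         # Counter exposition adds ``_total`` suffix that the OTel
--         # exporter already includes in the metric name itself, so no
--         # adjustment needed. Strip ``_created`` companion series the
--         # exporter adds for counters.
--         if head.endswith("_created"):
--             head = head[: -len("_created")]
--         names.add(head)
--     return names
-- ===== SOURCE B (Python) =====
-- import re
--
-- # One regex scan over the whole exposition text: at the start of each line
-- # (any of \n, \r, \r\n terminates a line), skip indentation, require the
-- # first character to be a real name character (not '#', whitespace or '{')
-- # and capture the name token up to the first whitespace or '{'.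
-- _NAME_RE = re.compile(r'(?:^|[\r\n])[ \t]*([^#\s{][^\s{]*)')
--
--
-- def _parse_metric_names(prom_text: str) -> set[str]:
--     return {
--         name[:-8] if name.endswith("_created") else name
--         for name in _NAME_RE.findall(prom_text)
--     }
-- ===== Notes on version B (the rewrite author's own statement) =====
-- stated objective: idiomatic
-- what changed: Replaces the per-line splitlines/strip/startswith/split pipeline with one regex scan of the whole text (re.findall with a pattern that skips indentation and comment lines and captures the name token) feeding a set comprehension.
-- intended difference: On texts with a malformed sample-line head token - one containing a tab (A splits only on a literal space) or an empty one (a stripped line starting with '{') - A reports that tab-containing or empty string as a metric name, while B reports the token cut at the first whitespace and no name at all for a '{' line, which matches the documented intent ('the leading token before { or whitespace' of a sample line). — e.g. on _parse_metric_names("cpu\ttotal 1"): A returns ["cpu\ttotal"], B returns ["cpu"]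
import Mathlib
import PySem

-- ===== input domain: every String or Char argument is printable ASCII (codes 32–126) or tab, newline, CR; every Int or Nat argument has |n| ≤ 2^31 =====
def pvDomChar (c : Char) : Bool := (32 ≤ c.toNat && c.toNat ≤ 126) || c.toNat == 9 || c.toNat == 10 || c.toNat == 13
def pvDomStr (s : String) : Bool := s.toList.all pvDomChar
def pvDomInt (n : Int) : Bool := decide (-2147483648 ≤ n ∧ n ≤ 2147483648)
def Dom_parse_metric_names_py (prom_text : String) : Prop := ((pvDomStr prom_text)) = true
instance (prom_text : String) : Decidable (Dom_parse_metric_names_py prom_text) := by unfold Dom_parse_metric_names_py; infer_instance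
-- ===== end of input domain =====

-- B replaces A's per-line strip/startswith/split pipeline by one regex scan of the
-- whole text (re.findall) feeding a set comprehension; no speed claim.
-- Return-value equivalence only; neither version mutates its argument.

-- ===== PORT A =====
def parse_metric_names_py (prom_text : String) : List String :=
  (PySem.Str.splitlines prom_text).foldl
    (fun names raw =>
      let line := PySem.Str.strip raw
      if line == "" || PySem.Str.startswith line "#" then names
      else
        -- str.split with a nonempty separator always returns a nonempty list,
        -- so Python's [0] never raises; ported as `headD`.
        let h1 := ((PySem.Str.splitMax? line "{" 1).getD []).headD ""
        let head := ((PySem.Str.splitMax? h1 " " 1).getD []).headD ""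
        let head' := if PySem.Str.endswith head "_created"
                     then PySem.Str.slice head none (some (-8)) else head
        PySem.Set.add names head')
    []

-- ===== PORT B =====
-- Source B scans the text once with the regex  (?:^|[\r\n])[ \t]*([^#\s{][^\s{]*) .
-- The scan is ported by hand, step for step (no regex engine in PySem): pvScan is
-- at a match-start position (start of text or just after a [\r\n] character): it
-- skips [ \t]*, then either captures [^#\s{][^\s{]* or fails on this line; pvSkip
-- advances to just after the next [\r\n] character. Exact for the ASCII domain.
def pvIsIndent (c : Char) : Bool := c == ' ' || c == '\t'
def pvIsBrk (c : Char) : Bool := c == '\n' || c == '\r'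
-- the character class [^\s{]
def pvNameChar (c : Char) : Bool := !(PySem.Chars.isspace c) && !(c == '{')

mutual
def pvScan (cs : List Char) : List (List Char) :=
  match h : cs.dropWhile pvIsIndent with
  | [] => []
  | c :: t =>
    if c == '#' || PySem.Chars.isspace c || c == '{' then pvSkip (c :: t)
    else (c :: t.takeWhile pvNameChar) :: pvSkip (t.dropWhile pvNameChar)
termination_by 2 * cs.length + 1
decreasing_by
  · have h1 : (c :: t).length ≤ cs.length := h ▸ cs.length_dropWhile_le pvIsIndent
    omega
  · have h1 : (c :: t).length ≤ cs.length := h ▸ cs.length_dropWhile_le pvIsIndent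
    have h2 : (t.dropWhile pvNameChar).length ≤ t.length := t.length_dropWhile_le pvNameChar
    simp at h1
    omega

def pvSkip (cs : List Char) : List (List Char) :=
  match h : cs.dropWhile (fun c => !(pvIsBrk c)) with
  | [] => []
  | b :: t => pvScan t
termination_by 2 * cs.length
decreasing_by
  have h1 : (b :: t).length ≤ cs.length := h ▸ cs.length_dropWhile_le _
  simp at h1
  omega
end

def parse_metric_names_py_alt (prom_text : String) : List String :=
  (pvScan prom_text.toList).foldl
    (fun names n =>
      PySem.Set.add names (String.ofList
        (if PySem.Chars.endswith n ['_', 'c', 'r', 'e', 'a', 't', 'e', 'd']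
         then PySem.List.slice n none (some (-8)) else n)))
    []

-- ===== PRECONDITION & SPEC =====
-- On texts with a malformed sample-line head token — one containing a tab (A splits
-- only on a literal space) or an empty one (stripped line starting with '{') — A
-- reports that tab-containing or empty string as a metric name; B reports the token
-- cut at the first whitespace, and no name at all for a '{' line, which is the
-- documented intent ("the metric name is the leading token before '{' or whitespace
-- on sample lines").
def D_parse_metric_names_py (prom_text : String) : Prop :=
  ∃ l ∈ PySem.Chars.splitlines prom_text.toList,
    (PySem.Chars.strip l).head? = some '{' ∨
    '\t' ∈ (PySem.Chars.strip l).takeWhile (fun a => a != '{' && a != ' ')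
instance (prom_text : String) : Decidable (D_parse_metric_names_py prom_text) := by
  unfold D_parse_metric_names_py; infer_instance

def Spec_parse_metric_names_py (prom_text : String) (out : List String) : Prop :=
  ¬ D_parse_metric_names_py prom_text → out = parse_metric_names_py_alt prom_text
instance (prom_text : String) (out : List String) : Decidable (Spec_parse_metric_names_py prom_text out) := by
  unfold Spec_parse_metric_names_py; infer_instance

def pvDiffWitness_parse_metric_names_py : String := "cpu\ttotal 1"
def pvDiffWitnessOut_parse_metric_names_py : (List String) × (List String) :=
  (["cpu\ttotal"], ["cpu"])

-- ===== CLAIM (what is proved, stated in full; the proofs are below) =====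
def Claim_unchanged_parse_metric_names_py : Prop := ∀ (prom_text : String), Dom_parse_metric_names_py prom_text → Spec_parse_metric_names_py prom_text (parse_metric_names_py prom_text)
def Claim_changed_parse_metric_names_py : Prop := Dom_parse_metric_names_py (pvDiffWitness_parse_metric_names_py) ∧ D_parse_metric_names_py (pvDiffWitness_parse_metric_names_py) ∧ parse_metric_names_py (pvDiffWitness_parse_metric_names_py) = pvDiffWitnessOut_parse_metric_names_py.1 ∧ parse_metric_names_py_alt (pvDiffWitness_parse_metric_names_py) = pvDiffWitnessOut_parse_metric_names_py.2 ∧ pvDiffWitnessOut_parse_metric_names_py.1 ≠ pvDiffWitnessOut_parse_metric_names_py.2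

-- ===== LEMMAS AND PROOFS =====

def pvWS (c : Char) : Bool := c == ' ' || c == '\t'
def pvKeep (c : Char) : Bool := !(c == '{') && !(c == ' ')

def pvCreated (h : List Char) : List Char :=
  if PySem.Chars.endswith h ['_', 'c', 'r', 'e', 'a', 't', 'e', 'd']
  then PySem.List.slice h none (some (-8)) else h

-- A's per-line body, expressed on `List Char`.
def pvLineStep (names : PySem.Set String) (l : List Char) : PySem.Set String :=
  if (PySem.Chars.strip l).isEmpty || PySem.Chars.startswith (PySem.Chars.strip l) ['#'] then names
  else
    PySem.Set.add names (String.ofList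
      (pvCreated (((PySem.Chars.strip l).takeWhile (fun a => !(a == '{'))).takeWhile (fun a => !(a == ' ')))))

-- B's per-line result: the regex's captured token on this line, if any.
def pvBTok (l : List Char) : Option (List Char) :=
  match l.dropWhile pvIsIndent with
  | [] => none
  | c :: t =>
    if c == '#' || PySem.Chars.isspace c || c == '{' then none
    else some (c :: t.takeWhile pvNameChar)

def pvBAdd (names : PySem.Set String) (n : List Char) : PySem.Set String :=
  PySem.Set.add names (String.ofList (pvCreated n))

-- D_'s per-line condition
def pvDLine (l : List Char) : Bool :=
  (PySem.Chars.strip l).head? == some '{' ||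
  ((PySem.Chars.strip l).takeWhile (fun a => a != '{' && a != ' ')).contains '\t'

-- characters admitted inside a single line (domain, not a line break)
def pvGood (c : Char) : Prop := pvDomChar c = true ∧ c ≠ '\n' ∧ c ≠ '\r'

theorem pvChar_toNat_inj {c d : Char} (h : c.toNat = d.toNat) : c = d :=
  Char.ext (UInt32.toNat_inj.mp h)

theorem pvBeq_toNat (c d : Char) : (c == d) = decide (c.toNat = d.toNat) := by
  by_cases h : c = d
  · subst h; simp
  · have h' : c.toNat ≠ d.toNat := fun hn => h (pvChar_toNat_inj hn)
    simp [h, h']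

theorem pvIsspace_eq (c : Char) (h : pvGood c) : PySem.Chars.isspace c = pvWS c := by
  obtain ⟨hd, h1, h2⟩ := h
  have h1' : c.toNat ≠ 10 := fun hn => h1 (pvChar_toNat_inj hn)
  have h2' : c.toNat ≠ 13 := fun hn => h2 (pvChar_toNat_inj hn)
  have hdom : (((32 ≤ c.toNat ∧ c.toNat ≤ 126) ∨ c.toNat = 9) ∨ c.toNat = 10) ∨ c.toNat = 13 := by
    simpa [pvDomChar, Bool.or_eq_true, Bool.and_eq_true, decide_eq_true_eq] using hd
  unfold pvWS
  rw [pvBeq_toNat c ' ', pvBeq_toNat c '\t']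
  have e1 : (' ').toNat = 32 := rfl
  have e2 : ('\t').toNat = 9 := rfl
  rw [e1, e2]
  apply Bool.coe_iff_coe.mp
  simp only [PySem.Chars.isspace, Bool.or_eq_true, Bool.and_eq_true, decide_eq_true_eq]
  omega

-- ---------- A-side bridge (splitMax?/strip pipeline on Chars) ----------

theorem pvGo0 (c : Char) (fuel : Nat) (l : List Char) (acc : List (List Char)) :
    PySem.Chars.splitOnMax.go [c] fuel 0 l [] acc = acc.reverse ++ [l] := by
  cases fuel with
  | zero => cases l <;> simp [PySem.Chars.splitOnMax.go]
  | succ f => cases l <;> simp [PySem.Chars.splitOnMax.go]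

theorem pvGo1 (c : Char) (l : List Char) (fuel : Nat) (cur : List Char) (acc : List (List Char))
    (hf : l.length < fuel) :
    PySem.Chars.splitOnMax.go [c] fuel 1 l cur acc =
      acc.reverse ++ (cur.reverse ++ l.takeWhile (fun a => !(a == c))) ::
        (if l.any (fun a => a == c) then [(l.dropWhile (fun a => !(a == c))).tail] else []) := by
  induction l generalizing fuel cur acc with
  | nil =>
    cases fuel with
    | zero => omega
    | succ f => simp [PySem.Chars.splitOnMax.go]
  | cons a l ih =>
    cases fuel with
    | zero => simp at hf
    | succ f =>
      have hpre : [c].isPrefixOf (a :: l) = (c == a) := by simp [List.isPrefixOf]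
      by_cases hca : c = a
      · subst hca
        rw [PySem.Chars.splitOnMax.go.eq_def]
        simp only [hpre, BEq.rfl, if_true]
        simp only [show ¬(1 = 0) by omega, if_false]
        rw [show (1 : Nat) - 1 = 0 from rfl]
        rw [show List.drop [c].length (c :: l) = l from rfl]
        rw [pvGo0]
        simp [List.takeWhile_cons, List.dropWhile_cons]
      · rw [PySem.Chars.splitOnMax.go.eq_def]
        simp only [show ¬(1 = 0) by omega, if_false]
        rw [show [c].isPrefixOf (a :: l) = false by simp [List.isPrefixOf, beq_false_of_ne hca]]
        simp only [Bool.false_eq_true, if_false]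
        rw [ih f (a :: cur) acc (by simpa using hf)]
        have hac : (a == c) = false := beq_false_of_ne (fun h => hca h.symm)
        simp [List.takeWhile_cons, List.dropWhile_cons, hac, List.append_assoc]

theorem pvTakeWhile_comp (l : List Char) :
    (l.takeWhile (fun a => !(a == '{'))).takeWhile (fun a => !(a == ' ')) = l.takeWhile pvKeep := by
  induction l with
  | nil => rfl
  | cons c l ih =>
    by_cases h1 : c = '{'
    · subst h1; simp [List.takeWhile_cons, pvKeep]
    · by_cases h2 : c = ' '
      · subst h2; simp [List.takeWhile_cons, pvKeep]
      · simp [List.takeWhile_cons, pvKeep, beq_false_of_ne h1, beq_false_of_ne h2, ih]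

theorem pvOfListBeqEmpty (X : List Char) : (String.ofList X == "") = X.isEmpty := by
  cases X with
  | nil => decide
  | cons c cs =>
    have h : String.ofList (c :: cs) ≠ "" := by simp [String.ofList_eq_empty_iff]
    simp [beq_eq_false_iff_ne, h]

set_option maxHeartbeats 1000000 in
theorem pvABridge (s : String) :
    parse_metric_names_py s = (PySem.Chars.splitlines s.toList).foldl pvLineStep [] := by
  unfold parse_metric_names_py
  rw [show PySem.Str.splitlines s = (PySem.Chars.splitlines s.toList).map String.ofList from rfl]
  rw [List.foldl_map]
  congr 1
  funext names l
  simp only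
  have htl : (String.ofList l).toList = l := String.toList_ofList
  have hstrip : PySem.Str.strip (String.ofList l) = String.ofList (PySem.Chars.strip l) := by
    rw [PySem.Str.strip, htl]
  rw [hstrip]
  have hcond : ((String.ofList (PySem.Chars.strip l) == "") ||
      PySem.Str.startswith (String.ofList (PySem.Chars.strip l)) "#") =
      ((PySem.Chars.strip l).isEmpty || PySem.Chars.startswith (PySem.Chars.strip l) ['#']) := by
    rw [pvOfListBeqEmpty]
    rw [PySem.Str.startswith_eq, String.toList_ofList,
      show ("#" : String).toList = ['#'] from by decide]
  rw [pvLineStep, hcond]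
  by_cases hskip : ((PySem.Chars.strip l).isEmpty || PySem.Chars.startswith (PySem.Chars.strip l) ['#']) = true
  · rw [if_pos hskip, if_pos hskip]
  · rw [if_neg hskip, if_neg hskip]
    have hsplit1 : ∀ (L : List Char) (sepc : Char) (seps : String), seps.toList = [sepc] →
        ((PySem.Str.splitMax? (String.ofList L) seps 1).getD []).headD "" =
          String.ofList (L.takeWhile (fun a => !(a == sepc))) := by
      intro L sepc seps hsep
      rw [PySem.Str.splitMax?]
      rw [show (String.ofList L).toList = L from String.toList_ofList, hsep]
      rw [PySem.Chars.splitMax?]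
      rw [if_neg (by simp)]
      simp only [Option.map_some, Option.getD_some]
      rw [show PySem.Chars.splitOnMax L [sepc] 1 = (L.takeWhile (fun a => !(a == sepc))) ::
          (if L.any (fun a => a == sepc) then [(L.dropWhile (fun a => !(a == sepc))).tail] else []) from by
        unfold PySem.Chars.splitOnMax
        rw [if_neg (by omega), show (1 : Int).toNat = 1 from rfl,
          pvGo1 sepc L (L.length + 1) [] [] (by omega)]
        simp]
      simp
    rw [hsplit1 _ '{' "{" (by decide)]
    rw [hsplit1 _ ' ' " " (by decide)]
    congr 1
    have hend : PySem.Str.endswith (String.ofList (((PySem.Chars.strip l).takeWhile (fun a => !(a == '{'))).takeWhile (fun a => !(a == ' ')))) "_created" =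
        PySem.Chars.endswith (((PySem.Chars.strip l).takeWhile (fun a => !(a == '{'))).takeWhile (fun a => !(a == ' '))) ['_', 'c', 'r', 'e', 'a', 't', 'e', 'd'] := by
      rw [PySem.Str.endswith, String.toList_ofList,
        show ("_created" : String).toList = ['_', 'c', 'r', 'e', 'a', 't', 'e', 'd'] from by decide]
    unfold pvCreated
    rw [hend]
    by_cases he : PySem.Chars.endswith (((PySem.Chars.strip l).takeWhile (fun a => !(a == '{'))).takeWhile (fun a => !(a == ' ')))
        ['_', 'c', 'r', 'e', 'a', 't', 'e', 'd'] = true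
    · rw [if_pos he, if_pos he]
      rw [PySem.Str.slice, String.toList_ofList]
      rfl
    · rw [if_neg he, if_neg he]

-- ---------- splitlines decomposition ----------

theorem pvGoPair (isB : Char → Bool) (r' cur : List Char) (acc : List (List Char)) :
    PySem.Chars.splitlines.go isB ('\x0d' :: '\n' :: r') cur acc =
      PySem.Chars.splitlines.go isB r' [] (cur.reverse :: acc) := rfl

theorem pvGoBreak (isB : Char → Bool) (c : Char) (rest cur : List Char) (acc : List (List Char))
    (hc : isB c = true) (h0 : ∀ r', c = '\x0d' → rest = '\n' :: r' → False) :
    PySem.Chars.splitlines.go isB (c :: rest) cur acc =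
      PySem.Chars.splitlines.go isB rest [] (cur.reverse :: acc) := by
  rcases rest with _ | ⟨c2, r2⟩
  · rw [PySem.Chars.splitlines.go.eq_def]
    split <;> simp_all
  · by_cases h13 : c = '\x0d'
    · subst h13
      by_cases h2 : c2 = '\n'
      · subst h2; exact (h0 r2 rfl rfl).elim
      · rw [PySem.Chars.splitlines.go.eq_def]
        split
        · simp_all
        · simp_all
        · rename_i heq
          obtain ⟨h1, h2'⟩ := List.cons.inj heq
          subst h1; subst h2'
          rw [if_pos hc]
    · rw [PySem.Chars.splitlines.go.eq_def]
      split
      · simp_all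
      · simp_all
      · rename_i heq
        obtain ⟨h1, h2'⟩ := List.cons.inj heq
        subst h1; subst h2'
        rw [if_pos hc]

theorem pvGoCons (isB : Char → Bool) (c : Char) (rest cur : List Char) (acc : List (List Char))
    (hc : isB c = false) (h0 : ∀ r', c = '\x0d' → rest = '\n' :: r' → False) :
    PySem.Chars.splitlines.go isB (c :: rest) cur acc =
      PySem.Chars.splitlines.go isB rest (c :: cur) acc := by
  rcases rest with _ | ⟨c2, r2⟩
  · rw [PySem.Chars.splitlines.go.eq_def]
    split <;> simp_all
  · by_cases h13 : c = '\x0d'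
    · subst h13
      by_cases h2 : c2 = '\n'
      · subst h2; exact (h0 r2 rfl rfl).elim
      · rw [PySem.Chars.splitlines.go.eq_def]
        split
        · simp_all
        · simp_all
        · rename_i heq
          obtain ⟨h1, h2'⟩ := List.cons.inj heq
          subst h1; subst h2'
          rw [if_neg (by simp [hc])]
    · rw [PySem.Chars.splitlines.go.eq_def]
      split
      · simp_all
      · simp_all
      · rename_i heq
        obtain ⟨h1, h2'⟩ := List.cons.inj heq
        subst h1; subst h2'
        rw [if_neg (by simp [hc])]

theorem pvGoNil (isB : Char → Bool) (cur : List Char) (acc : List (List Char)) :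
    PySem.Chars.splitlines.go isB [] cur acc =
      if cur.isEmpty then acc.reverse else (cur.reverse :: acc).reverse := by
  rw [PySem.Chars.splitlines.go.eq_def]

theorem pvGoAcc (isB : Char → Bool) :
    ∀ n cs cur acc, cs.length ≤ n →
      PySem.Chars.splitlines.go isB cs cur acc =
        acc.reverse ++ PySem.Chars.splitlines.go isB cs cur [] := by
  intro n
  induction n with
  | zero =>
    intro cs cur acc hlen
    have : cs = [] := List.eq_nil_of_length_eq_zero (by omega)
    subst this
    rw [pvGoNil, pvGoNil]
    by_cases hcur : cur.isEmpty
    · simp [hcur]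
    · simp [hcur]
  | succ n ih =>
    intro cs cur acc hlen
    rcases cs with _ | ⟨c, rest⟩
    · rw [pvGoNil, pvGoNil]
      by_cases hcur : cur.isEmpty
      · simp [hcur]
      · simp [hcur]
    · by_cases hc : isB c = true
      · by_cases hpair : c = '\x0d' ∧ ∃ r', rest = '\n' :: r'
        · obtain ⟨rfl, r', rfl⟩ := hpair
          rw [pvGoPair, pvGoPair]
          rw [ih r' [] (cur.reverse :: acc) (by simp at hlen; omega),
            ih r' [] (cur.reverse :: []) (by simp at hlen; omega)]
          simp
        · have h0 : ∀ r', c = '\x0d' → rest = '\n' :: r' → False := by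
            intro r' h1 h2; exact hpair ⟨h1, r', h2⟩
          rw [pvGoBreak isB c rest cur acc hc h0, pvGoBreak isB c rest cur [] hc h0]
          rw [ih rest [] (cur.reverse :: acc) (by simp at hlen; omega),
            ih rest [] (cur.reverse :: []) (by simp at hlen; omega)]
          simp
      · have hc' : isB c = false := by simpa using hc
        by_cases hpair : c = '\x0d' ∧ ∃ r', rest = '\n' :: r'
        · obtain ⟨rfl, r', rfl⟩ := hpair
          rw [pvGoPair, pvGoPair]
          rw [ih r' [] (cur.reverse :: acc) (by simp at hlen; omega),
            ih r' [] (cur.reverse :: []) (by simp at hlen; omega)]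
          simp
        · have h0 : ∀ r', c = '\x0d' → rest = '\n' :: r' → False := by
            intro r' h1 h2; exact hpair ⟨h1, r', h2⟩
          rw [pvGoCons isB c rest cur acc hc' h0, pvGoCons isB c rest cur [] hc' h0]
          exact ih rest (c :: cur) acc (by simp at hlen; omega)

-- consume a break-free prefix into cur
theorem pvGoPrefix (isB : Char → Bool) (hR : isB '\x0d' = true) (p : List Char)
    (hp : ∀ c ∈ p, isB c = false) :
    ∀ xs cur acc, PySem.Chars.splitlines.go isB (p ++ xs) cur acc =
      PySem.Chars.splitlines.go isB xs (p.reverse ++ cur) acc := by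
  induction p with
  | nil => intro xs cur acc; simp
  | cons c q ih =>
    intro xs cur acc
    have hc : isB c = false := hp c (by simp)
    have h0 : ∀ r', c = '\x0d' → (q ++ xs) = '\n' :: r' → False := by
      intro r' h1 _; rw [h1] at hc; rw [hR] at hc; simp at hc
    rw [List.cons_append, pvGoCons isB c (q ++ xs) cur acc hc h0,
      ih (fun d hd => hp d (by simp [hd])) xs (c :: cur) acc]
    simp

-- ---------- B-side scanner lemmas ----------

-- non-dependent unfolding equations for the scanner
theorem pvScan_nil' (cs : List Char) (h : cs.dropWhile pvIsIndent = []) : pvScan cs = [] := by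
  rw [pvScan.eq_def]
  split
  · rfl
  · rename_i c t h2
    rw [h] at h2
    cases h2

theorem pvScan_skip (cs : List Char) (c : Char) (t : List Char)
    (h : cs.dropWhile pvIsIndent = c :: t)
    (hc : (c == '#' || PySem.Chars.isspace c || c == '{') = true) :
    pvScan cs = pvSkip (c :: t) := by
  rw [pvScan.eq_def]
  split
  · rename_i h2
    rw [h] at h2
    cases h2
  · rename_i c2 t2 h2
    rw [h] at h2
    obtain ⟨rfl, rfl⟩ := List.cons.inj h2
    rw [if_pos hc]

theorem pvScan_tok (cs : List Char) (c : Char) (t : List Char)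
    (h : cs.dropWhile pvIsIndent = c :: t)
    (hc : (c == '#' || PySem.Chars.isspace c || c == '{') = false) :
    pvScan cs = (c :: t.takeWhile pvNameChar) :: pvSkip (t.dropWhile pvNameChar) := by
  rw [pvScan.eq_def]
  split
  · rename_i h2
    rw [h] at h2
    cases h2
  · rename_i c2 t2 h2
    rw [h] at h2
    obtain ⟨rfl, rfl⟩ := List.cons.inj h2
    rw [if_neg (by rw [hc]; simp)]

theorem pvSkip_nil' (cs : List Char) (h : cs.dropWhile (fun c => !(pvIsBrk c)) = []) :
    pvSkip cs = [] := by
  rw [pvSkip.eq_def]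
  split
  · rfl
  · rename_i b t h2
    rw [h] at h2
    cases h2

theorem pvSkip_cons' (cs : List Char) (b : Char) (t : List Char)
    (h : cs.dropWhile (fun c => !(pvIsBrk c)) = b :: t) :
    pvSkip cs = pvScan t := by
  rw [pvSkip.eq_def]
  split
  · rename_i h2
    rw [h] at h2
    cases h2
  · rename_i b2 t2 h2
    rw [h] at h2
    obtain ⟨rfl, rfl⟩ := List.cons.inj h2
    rfl

theorem pvSkipNil : pvSkip [] = [] := pvSkip_nil' [] rfl

theorem pvSkipThrough (q : List Char) (hq : ∀ c ∈ q, pvIsBrk c = false) (rest : List Char) :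
    pvSkip (q ++ rest) = pvSkip rest := by
  have hx : (q ++ rest).dropWhile (fun c => !(pvIsBrk c)) = rest.dropWhile (fun c => !(pvIsBrk c)) := by
    rw [List.dropWhile_append]
    rw [List.dropWhile_eq_nil_iff.mpr (fun x hx => by simp [hq x hx])]
    simp
  cases hr : rest.dropWhile (fun c => !(pvIsBrk c)) with
  | nil => rw [pvSkip_nil' _ (hx.trans hr), pvSkip_nil' _ hr]
  | cons b t => rw [pvSkip_cons' _ b t (hx.trans hr), pvSkip_cons' _ b t hr]

theorem pvSkipCons (b : Char) (r : List Char) (hb : pvIsBrk b = true) :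
    pvSkip (b :: r) = pvScan r :=
  pvSkip_cons' (b :: r) b r (List.dropWhile_cons_of_neg (by simp [hb]))

theorem pvScanNewline (r : List Char) : pvScan ('\n' :: r) = pvScan r := by
  rw [pvScan_skip ('\n' :: r) '\n' r (List.dropWhile_cons_of_neg (by decide)) (by decide)]
  exact pvSkipCons '\n' r (by decide)

theorem pvBrkCases (b : Char) (hb : pvIsBrk b = true) : b = '\n' ∨ b = '\r' := by
  simp [pvIsBrk] at hb
  exact hb

theorem pvBrkNotName (b : Char) (hb : pvIsBrk b = true) : pvNameChar b = false := by
  rcases pvBrkCases b hb with rfl | rfl <;> decide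

theorem pvTakeDropAppend (q : List Char) (rest : List Char)
    (hrest : rest = [] ∨ ∃ b r', rest = b :: r' ∧ pvIsBrk b = true) :
    (q ++ rest).takeWhile pvNameChar = q.takeWhile pvNameChar ∧
    (q ++ rest).dropWhile pvNameChar = q.dropWhile pvNameChar ++ rest := by
  induction q with
  | nil =>
    rcases hrest with rfl | ⟨b, r', rfl, hb⟩
    · simp
    · constructor
      · simp [List.takeWhile_cons, pvBrkNotName b hb]
      · simp [List.dropWhile_cons, pvBrkNotName b hb]
  | cons c q ih =>
    by_cases hc : pvNameChar c = true
    · simp only [List.cons_append, List.takeWhile_cons, List.dropWhile_cons, hc]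
      simpa [hc] using ih
    · have hc' : pvNameChar c = false := by simpa using hc
      simp [List.takeWhile_cons, List.dropWhile_cons, hc']

-- scan starting at a line (break-free, in-domain chars), the remainder of the
-- text `rest` beginning with a line break (or empty): one regex match attempt.
theorem pvScanLine (p : List Char) (hp : ∀ c ∈ p, pvGood c) (rest : List Char)
    (hrest : rest = [] ∨ ∃ b r', rest = b :: r' ∧ pvIsBrk b = true) :
    pvScan (p ++ rest) = (pvBTok p).toList ++ pvSkip rest := by
  have hpbrk : ∀ c ∈ p, pvIsBrk c = false := by
    intro c hc
    have h := hp c hc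
    simp [pvIsBrk, beq_false_of_ne h.2.1, beq_false_of_ne h.2.2]
  cases hd : p.dropWhile pvIsIndent with
  | nil =>
    have hbt : pvBTok p = none := by rw [pvBTok, hd]
    have hdw : (p ++ rest).dropWhile pvIsIndent = rest.dropWhile pvIsIndent := by
      rw [List.dropWhile_append, hd]
      simp
    rw [hbt]
    rcases hrest with rfl | ⟨b, r', rfl, hb⟩
    · rw [pvScan_nil' _ (by rw [hdw]; rfl), pvSkipNil]
      rfl
    · have hbni : pvIsIndent b = false := by
        rcases pvBrkCases b hb with rfl | rfl <;> decide
      have hdw2 : (p ++ b :: r').dropWhile pvIsIndent = b :: r' := by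
        rw [hdw, List.dropWhile_cons_of_neg (by simp [hbni])]
      have hbsp : (b == '#' || PySem.Chars.isspace b || b == '{') = true := by
        rcases pvBrkCases b hb with rfl | rfl <;> decide
      rw [pvScan_skip _ b r' hdw2 hbsp]
      rfl
  | cons c t =>
    have hct : ∀ x ∈ c :: t, x ∈ p := by
      intro x hx
      exact (List.dropWhile_subset pvIsIndent) (hd ▸ hx)
    have hcg : pvGood c := hp c (hct c (by simp))
    have hci : pvIsIndent c = false := by
      have := List.head_dropWhile_not (p := pvIsIndent) (l := p)
      rw [hd] at this
      simpa using this (by simp)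
    have hcsp : PySem.Chars.isspace c = false := by
      rw [pvIsspace_eq c hcg]; exact hci
    have hdw : (p ++ rest).dropWhile pvIsIndent = c :: (t ++ rest) := by
      rw [List.dropWhile_append, hd]
      simp
    by_cases hcc : (c == '#' || c == '{') = true
    · have hcond : (c == '#' || PySem.Chars.isspace c || c == '{') = true := by
        rw [hcsp]
        revert hcc
        simp
      have hbt : pvBTok p = none := by
        rw [pvBTok, hd]
        simp only [hcond, if_true]
      rw [hbt, pvScan_skip _ c (t ++ rest) hdw hcond]
      rw [show c :: (t ++ rest) = (c :: t) ++ rest from rfl]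
      rw [pvSkipThrough (c :: t) (fun x hx => hpbrk x (hct x hx)) rest]
      rfl
    · have hcc' : (c == '#' || c == '{') = false := by simpa using hcc
      have hcond : (c == '#' || PySem.Chars.isspace c || c == '{') = false := by
        rw [hcsp]
        revert hcc'
        simp
      have hbt : pvBTok p = some (c :: t.takeWhile pvNameChar) := by
        rw [pvBTok, hd]
        simp only [hcond, Bool.false_eq_true, if_false]
      rw [hbt, pvScan_tok _ c (t ++ rest) hdw hcond]
      obtain ⟨htake, hdrop⟩ := pvTakeDropAppend t rest hrest
      rw [htake, hdrop]
      rw [pvSkipThrough (t.dropWhile pvNameChar)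
        (fun x hx => hpbrk x (hct x (List.mem_cons_of_mem _ ((List.dropWhile_subset pvNameChar) hx)))) rest]
      rfl

-- the full scan = per-line match over splitlines
theorem pvScanSplit (isB : Char → Bool)
    (hB : ∀ c, pvDomChar c = true → isB c = pvIsBrk c) :
    ∀ n cs, cs.length ≤ n → (∀ c ∈ cs, pvDomChar c = true) →
      pvScan cs = (PySem.Chars.splitlines.go isB cs [] []).filterMap pvBTok := by
  have hR : isB '\x0d' = true := by rw [hB '\x0d' (by decide)]; decide
  intro n
  induction n with
  | zero =>
    intro cs hlen hcs
    have : cs = [] := List.eq_nil_of_length_eq_zero (by omega)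
    subst this
    rw [pvScan_nil' [] rfl, pvGoNil]
    simp
  | succ n ih =>
    intro cs hlen hcs
    have hgoodOf : ∀ c ∈ cs, isB c = false → pvGood c := by
      intro c hc hb
      have hd := hcs c hc
      have : pvIsBrk c = false := by rw [← hB c hd]; exact hb
      refine ⟨hd, ?_, ?_⟩ <;> intro he <;> subst he <;> simp [pvIsBrk] at this
    cases hsplit : cs.dropWhile (fun c => !(isB c)) with
    | nil =>
      have hall : ∀ c ∈ cs, isB c = false := by
        intro c hc
        have := List.dropWhile_eq_nil_iff.mp hsplit c hc
        simpa using this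
      have hgood : ∀ c ∈ cs, pvGood c := fun c hc => hgoodOf c hc (hall c hc)
      have h1 : pvScan cs = (pvBTok cs).toList := by
        have := pvScanLine cs hgood [] (Or.inl rfl)
        simpa [pvSkipNil] using this
      have hpre := pvGoPrefix isB hR cs hall [] [] []
      rw [List.append_nil] at hpre
      rw [h1, hpre, pvGoNil]
      simp only [List.append_nil, List.reverse_reverse]
      cases cs with
      | nil => simp [show pvBTok [] = none from rfl]
      | cons x xs =>
        rw [if_neg (by simp)]
        cases hbt : pvBTok (x :: xs) <;> simp [List.filterMap_cons, hbt]
    | cons b r =>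
      have hcs_eq : cs.takeWhile (fun c => !(isB c)) ++ b :: r = cs := by
        rw [← hsplit]; exact List.takeWhile_append_dropWhile
      set p := cs.takeWhile (fun c => !(isB c)) with hp_def
      have hpmem : ∀ c ∈ p, c ∈ cs := fun c hc => (List.takeWhile_subset _) hc
      have hpfalse : ∀ c ∈ p, isB c = false := by
        intro c hc
        have := List.mem_takeWhile_imp hc
        simpa using this
      have hpgood : ∀ c ∈ p, pvGood c := fun c hc => hgoodOf c (hpmem c hc) (hpfalse c hc)
      have hbmem : b ∈ cs := by
        rw [← hcs_eq]; exact List.mem_append_right _ (by simp)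
      have hbB : isB b = true := by
        have := List.head_dropWhile_not (p := fun c => !(isB c)) (l := cs)
        rw [hsplit] at this
        simpa using this (by simp)
      have hbbrk : pvIsBrk b = true := by rw [← hB b (hcs b hbmem)]; exact hbB
      have hrmem : ∀ c ∈ r, c ∈ cs := by
        intro c hc
        rw [← hcs_eq]
        exact List.mem_append_right _ (by simp [hc])
      have hlenp : p.length + (b :: r).length = cs.length := by
        rw [← hcs_eq]; simp
      have hL : pvScan cs = (pvBTok p).toList ++ pvScan r := by
        rw [← hcs_eq, pvScanLine p hpgood (b :: r) (Or.inr ⟨b, r, rfl, hbbrk⟩),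
          pvSkipCons b r hbbrk]
      rw [hL]
      conv_rhs => rw [← hcs_eq]
      rw [pvGoPrefix isB hR p hpfalse (b :: r) [] []]
      by_cases hpair : b = '\x0d' ∧ ∃ r2, r = '\n' :: r2
      · obtain ⟨rfl, r2, rfl⟩ := hpair
        rw [pvGoPair]
        rw [pvGoAcc isB r2.length r2 [] _ le_rfl]
        rw [pvScanNewline]
        rw [ih r2 (by simp at hlenp; omega) (fun c hc => hcs c (hrmem c (by simp [hc])))]
        simp [List.filterMap_append, List.filterMap_cons]
        cases pvBTok p <;> simp
      · have h0 : ∀ r2, b = '\x0d' → r = '\n' :: r2 → False := by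
          intro r2 h1 h2; exact hpair ⟨h1, r2, h2⟩
        rw [pvGoBreak isB b r _ [] hbB h0]
        rw [pvGoAcc isB r.length r [] _ le_rfl]
        rw [ih r (by simp at hlenp; omega) (fun c hc => hcs c (hrmem c hc))]
        simp [List.filterMap_append, List.filterMap_cons]
        cases pvBTok p <;> simp

-- every line splitlines produces is break-free and in-domain
theorem pvLinesGood (isB : Char → Bool)
    (hB : ∀ c, pvDomChar c = true → isB c = pvIsBrk c) :
    ∀ n cs, cs.length ≤ n → (∀ c ∈ cs, pvDomChar c = true) →
      ∀ l ∈ PySem.Chars.splitlines.go isB cs [] [], ∀ c ∈ l, pvGood c := by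
  have hR : isB '\x0d' = true := by rw [hB '\x0d' (by decide)]; decide
  intro n
  induction n with
  | zero =>
    intro cs hlen hcs
    have : cs = [] := List.eq_nil_of_length_eq_zero (by omega)
    subst this
    rw [pvGoNil]
    simp
  | succ n ih =>
    intro cs hlen hcs
    have hgoodOf : ∀ c ∈ cs, isB c = false → pvGood c := by
      intro c hc hb
      have hd := hcs c hc
      have : pvIsBrk c = false := by rw [← hB c hd]; exact hb
      refine ⟨hd, ?_, ?_⟩ <;> intro he <;> subst he <;> simp [pvIsBrk] at this
    cases hsplit : cs.dropWhile (fun c => !(isB c)) with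
    | nil =>
      have hall : ∀ c ∈ cs, isB c = false := by
        intro c hc
        have := List.dropWhile_eq_nil_iff.mp hsplit c hc
        simpa using this
      have hpre := pvGoPrefix isB hR cs hall [] [] []
      rw [List.append_nil] at hpre
      rw [hpre, pvGoNil]
      simp only [List.append_nil, List.reverse_reverse]
      cases cs with
      | nil => simp
      | cons x xs =>
        rw [if_neg (by simp)]
        intro l hl c hc
        simp at hl
        subst hl
        exact hgoodOf c hc (hall c hc)
    | cons b r =>
      have hcs_eq : cs.takeWhile (fun c => !(isB c)) ++ b :: r = cs := by
        rw [← hsplit]; exact List.takeWhile_append_dropWhile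
      set p := cs.takeWhile (fun c => !(isB c)) with hp_def
      have hpmem : ∀ c ∈ p, c ∈ cs := fun c hc => (List.takeWhile_subset _) hc
      have hpfalse : ∀ c ∈ p, isB c = false := by
        intro c hc
        have := List.mem_takeWhile_imp hc
        simpa using this
      have hbB : isB b = true := by
        have := List.head_dropWhile_not (p := fun c => !(isB c)) (l := cs)
        rw [hsplit] at this
        simpa using this (by simp)
      have hrmem : ∀ c ∈ r, c ∈ cs := by
        intro c hc
        rw [← hcs_eq]
        exact List.mem_append_right _ (by simp [hc])
      have hlenp : p.length + (b :: r).length = cs.length := by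
        rw [← hcs_eq]; simp
      have hpre : PySem.Chars.splitlines.go isB cs [] [] =
          PySem.Chars.splitlines.go isB (b :: r) p.reverse [] := by
        conv_lhs => rw [← hcs_eq]
        rw [pvGoPrefix isB hR p hpfalse (b :: r) [] []]
        simp
      by_cases hpair : b = '\x0d' ∧ ∃ r2, r = '\n' :: r2
      · obtain ⟨rfl, r2, rfl⟩ := hpair
        rw [hpre, pvGoPair, pvGoAcc isB r2.length r2 [] _ le_rfl]
        intro l hl
        rcases List.mem_append.mp hl with hl | hl
        · simp at hl
          subst hl
          intro c hc
          exact hgoodOf c (hpmem c hc) (hpfalse c hc)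
        · exact ih r2 (by simp at hlenp; omega)
            (fun c hc => hcs c (hrmem c (by simp [hc]))) l hl
      · have h0 : ∀ r2, b = '\x0d' → r = '\n' :: r2 → False := by
          intro r2 h1 h2; exact hpair ⟨h1, r2, h2⟩
        rw [hpre, pvGoBreak isB b r _ [] hbB h0, pvGoAcc isB r.length r [] _ le_rfl]
        intro l hl
        rcases List.mem_append.mp hl with hl | hl
        · simp at hl
          subst hl
          intro c hc
          exact hgoodOf c (hpmem c hc) (hpfalse c hc)
        · exact ih r (by simp at hlenp; omega) (fun c hc => hcs c (hrmem c hc)) l hl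

-- ---------- rstrip lemmas ----------

theorem pvRstrip_append_cons (a : List Char) (h : Char) (t : List Char)
    (hh : PySem.Chars.isspace h = false) :
    PySem.Chars.rstrip (a ++ h :: t) = a ++ h :: PySem.Chars.rstrip t := by
  unfold PySem.Chars.rstrip
  rw [show (a ++ h :: t).reverse = t.reverse ++ h :: a.reverse by simp]
  rw [List.dropWhile_append]
  by_cases he : (t.reverse.dropWhile PySem.Chars.isspace).isEmpty = true
  · rw [if_pos he]
    rw [List.dropWhile_cons, hh]
    simp only [Bool.false_eq_true, if_false]
    simp only [List.isEmpty_iff] at he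
    simp [he]
  · rw [if_neg he]
    simp

theorem pvRstrip_cons (a : Char) (l : List Char) :
    PySem.Chars.rstrip (a :: l) =
      if (PySem.Chars.rstrip l).isEmpty && PySem.Chars.isspace a then []
      else a :: PySem.Chars.rstrip l := by
  unfold PySem.Chars.rstrip
  rw [show (a :: l).reverse = l.reverse ++ [a] by simp]
  rw [List.dropWhile_append]
  by_cases he : (l.reverse.dropWhile PySem.Chars.isspace).isEmpty = true
  · rw [if_pos he]
    simp only [List.isEmpty_iff] at he
    by_cases ha : PySem.Chars.isspace a = true
    · simp [List.dropWhile_cons, ha, he]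
    · have ha' : PySem.Chars.isspace a = false := by simpa using ha
      simp [List.dropWhile_cons, ha', he]
  · rw [if_neg he]
    have he' : (l.reverse.dropWhile PySem.Chars.isspace).reverse.isEmpty = false := by
      simp only [List.isEmpty_eq_false_iff] at he ⊢
      simpa using he
    simp [he']

-- ---------- the per-line core ----------

theorem pvCore (t : List Char) (ht : ∀ c ∈ t, pvGood c)
    (hnotab : '\t' ∉ (PySem.Chars.rstrip t).takeWhile pvKeep) :
    (PySem.Chars.rstrip t).takeWhile pvKeep = t.takeWhile pvNameChar := by
  induction t with
  | nil => simp [PySem.Chars.rstrip]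
  | cons a t' ih =>
    have hag := ht a (by simp)
    have ht' : ∀ c ∈ t', pvGood c := fun c hc => ht c (by simp [hc])
    rw [pvRstrip_cons] at hnotab ⊢
    by_cases hsp : a = ' '
    · subst hsp
      rw [List.takeWhile_cons_of_neg (show ¬ pvNameChar ' ' = true from by decide)]
      by_cases hz : (PySem.Chars.rstrip t').isEmpty = true
      · rw [if_pos (by rw [hz]; decide)]
        rfl
      · rw [if_neg (by simp [hz])]
        rw [List.takeWhile_cons_of_neg (show ¬ pvKeep ' ' = true from by decide)]
    · by_cases htb : a = '\t'
      · subst htb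
        rw [List.takeWhile_cons_of_neg (show ¬ pvNameChar '\t' = true from by decide)]
        by_cases hz : (PySem.Chars.rstrip t').isEmpty = true
        · rw [if_pos (by rw [hz]; decide)]
          rfl
        · rw [if_neg (by simp [hz])] at hnotab
          exfalso
          apply hnotab
          rw [List.takeWhile_cons_of_pos (by decide)]
          simp
      · by_cases hbr : a = '{'
        · subst hbr
          have hcnd : ((PySem.Chars.rstrip t').isEmpty && PySem.Chars.isspace '{') = false := by
            rw [show PySem.Chars.isspace '{' = false from by decide]
            simp
          rw [if_neg (by simp [hcnd])]
          rw [List.takeWhile_cons_of_neg (show ¬ pvKeep '{' = true from by decide),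
            List.takeWhile_cons_of_neg (show ¬ pvNameChar '{' = true from by decide)]
        · have hasp : PySem.Chars.isspace a = false := by
            rw [pvIsspace_eq a hag]
            simp [pvWS, beq_false_of_ne hsp, beq_false_of_ne htb]
          have hkeep : pvKeep a = true := by
            simp [pvKeep, beq_false_of_ne hbr, beq_false_of_ne hsp]
          have hname : pvNameChar a = true := by
            simp [pvNameChar, hasp, beq_false_of_ne hbr]
          rw [if_neg (by simp [hasp])] at hnotab ⊢
          rw [List.takeWhile_cons_of_pos hkeep] at hnotab ⊢
          rw [List.takeWhile_cons_of_pos hname]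
          have hx : '\t' ∉ (PySem.Chars.rstrip t').takeWhile pvKeep := by
            intro hmem
            exact hnotab (List.mem_cons_of_mem _ hmem)
          rw [ih ht' hx]

-- dropWhile by isspace = dropWhile by [ \t] on a break-free in-domain line
theorem pvDropIndent (l : List Char) (hl : ∀ c ∈ l, pvGood c) :
    l.dropWhile PySem.Chars.isspace = l.dropWhile pvIsIndent := by
  induction l with
  | nil => rfl
  | cons c t ih =>
    have hc := hl c (by simp)
    have he : PySem.Chars.isspace c = pvIsIndent c := pvIsspace_eq c hc
    by_cases hi : pvIsIndent c = true
    · rw [List.dropWhile_cons_of_pos (he ▸ hi), List.dropWhile_cons_of_pos hi]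
      exact ih (fun d hd => hl d (by simp [hd]))
    · have hi' : pvIsIndent c = false := by simpa using hi
      rw [List.dropWhile_cons_of_neg (by simp [he, hi']), List.dropWhile_cons_of_neg (by simp [hi'])]

-- per line: A's step = B's match-and-add, outside D_'s lines
theorem pvPerLine (l : List Char) (hl : ∀ c ∈ l, pvGood c) (hnd : pvDLine l = false)
    (names : PySem.Set String) :
    pvLineStep names l =
      (match pvBTok l with
       | none => names
       | some t => pvBAdd names t) := by
  have hstrip : PySem.Chars.strip l = PySem.Chars.rstrip (l.dropWhile PySem.Chars.isspace) := rfl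
  cases hd : l.dropWhile PySem.Chars.isspace with
  | nil =>
    have hbt : pvBTok l = none := by
      rw [pvBTok, ← pvDropIndent l hl, hd]
    have hse : PySem.Chars.strip l = [] := by rw [hstrip, hd]; rfl
    rw [hbt]
    simp [pvLineStep, hse]
  | cons c t =>
    have hd2 : l.dropWhile pvIsIndent = c :: t := by rw [← pvDropIndent l hl, hd]
    have hct : ∀ x ∈ c :: t, x ∈ l := fun x hx => (List.dropWhile_subset _) (hd ▸ hx)
    have hcg : pvGood c := hl c (hct c (by simp))
    have htg : ∀ x ∈ t, pvGood x := fun x hx => hl x (hct x (by simp [hx]))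
    have hcsp : PySem.Chars.isspace c = false := by
      have := List.head_dropWhile_not (p := PySem.Chars.isspace) (l := l)
      rw [hd] at this
      simpa using this (by simp)
    have hst : PySem.Chars.strip l = c :: PySem.Chars.rstrip t := by
      rw [hstrip, hd]
      simpa using pvRstrip_append_cons [] c t hcsp
    have hne : (PySem.Chars.strip l).isEmpty = false := by rw [hst]; rfl
    by_cases hh : c = '#'
    · subst hh
      have hbt : pvBTok l = none := by
        rw [pvBTok, hd2]
        simp
      have hsw : PySem.Chars.startswith (PySem.Chars.strip l) ['#'] = true := by
        rw [hst]; simp [PySem.Chars.startswith, List.isPrefixOf]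
      rw [hbt]
      simp [pvLineStep, hsw]
    · have hnsw : PySem.Chars.startswith (PySem.Chars.strip l) ['#'] = false := by
        rw [hst]
        simp [PySem.Chars.startswith, List.isPrefixOf]
        exact fun he => hh he.symm
      by_cases hbr : c = '{'
      · subst hbr
        exfalso
        have : pvDLine l = true := by
          rw [pvDLine, hst]
          simp
        rw [hnd] at this
        simp at this
      · have hbt : pvBTok l = some (c :: t.takeWhile pvNameChar) := by
          rw [pvBTok, hd2]
          simp [hcsp, hh, hbr]
        rw [hbt]
        show pvLineStep names l = pvBAdd names (c :: t.takeWhile pvNameChar)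
        rw [pvLineStep, hne, hnsw]
        simp only [Bool.or_self, Bool.false_eq_true, if_false]
        rw [pvTakeWhile_comp, hst]
        have hkc : pvKeep c = true := by
          have hcns : c ≠ ' ' := by
            intro he; subst he; simp [PySem.Chars.isspace] at hcsp
          simp [pvKeep, beq_false_of_ne hbr, beq_false_of_ne hcns]
        rw [List.takeWhile_cons_of_pos hkc]
        have hnotab : '\t' ∉ (PySem.Chars.rstrip t).takeWhile pvKeep := by
          intro hmem
          have : pvDLine l = true := by
            rw [pvDLine]
            apply Bool.or_eq_true_iff.mpr
            right
            rw [show (fun (a : Char) => a != '{' && a != ' ') = pvKeep from rfl]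
            rw [hst, List.takeWhile_cons_of_pos hkc]
            simp [List.contains_eq_mem]
            exact Or.inr hmem
          rw [hnd] at this
          simp at this
        rw [pvCore t htg hnotab]
        rfl

-- fold over the filterMap = fold over the lines with the per-line match
theorem pvFoldFilterMap (ls : List (List Char)) :
    ∀ init : PySem.Set String,
    (ls.filterMap pvBTok).foldl pvBAdd init =
      ls.foldl (fun nm l =>
        (match pvBTok l with
         | none => nm
         | some t => pvBAdd nm t)) init := by
  induction ls with
  | nil => intro init; rfl
  | cons l ls ih =>
    intro init
    rw [List.filterMap_cons]
    cases hbt : pvBTok l with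
    | none =>
      simp only [List.foldl_cons, hbt]
      exact ih init
    | some t =>
      simp only [List.foldl_cons, hbt]
      exact ih (pvBAdd init t)

theorem pvFoldCongr (ls : List (List Char))
    (h : ∀ l ∈ ls, (∀ c ∈ l, pvGood c) ∧ pvDLine l = false) :
    ∀ init, ls.foldl pvLineStep init =
      ls.foldl (fun nm l =>
        (match pvBTok l with
         | none => nm
         | some t => pvBAdd nm t)) init := by
  induction ls with
  | nil => intro init; rfl
  | cons l ls ih =>
    intro init
    obtain ⟨hg, hdl⟩ := h l (by simp)
    simp only [List.foldl_cons]
    rw [pvPerLine l hg hdl init]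
    exact ih (fun x hx => h x (by simp [hx])) _

-- all the pieces, parametric in splitlines' break test
theorem pvFinal (isB : Char → Bool)
    (hB : ∀ c, pvDomChar c = true → isB c = pvIsBrk c) (cs : List Char)
    (hcs : ∀ c ∈ cs, pvDomChar c = true)
    (hND : ∀ l ∈ PySem.Chars.splitlines.go isB cs [] [], pvDLine l = false) :
    (PySem.Chars.splitlines.go isB cs [] []).foldl pvLineStep [] =
      (pvScan cs).foldl pvBAdd [] := by
  rw [pvScanSplit isB hB cs.length cs le_rfl hcs]
  rw [pvFoldFilterMap]
  exact pvFoldCongr _ (fun l hl =>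
    ⟨pvLinesGood isB hB cs.length cs le_rfl hcs l hl, hND l hl⟩) []

-- the witness value of B's port, via the scanner equations
theorem pvAltWitness : pvScan ("cpu\ttotal 1".toList) = [['c', 'p', 'u']] := by
  rw [pvScan_tok _ 'c' ("pu\ttotal 1".toList) (by decide) (by decide)]
  rw [show ("pu\ttotal 1".toList).takeWhile pvNameChar = ['p', 'u'] from by decide]
  rw [show ("pu\ttotal 1".toList).dropWhile pvNameChar = "\ttotal 1".toList from by decide]
  rw [pvSkip_nil' _ (by decide)]

-- ===== VERDICT (by name: the statements are the Claim_ definitions above) =====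
theorem parse_metric_names_py_spec : Claim_unchanged_parse_metric_names_py := by
  intro prom hDom
  unfold Spec_parse_metric_names_py
  intro hND
  have hcs : ∀ c ∈ prom.toList, pvDomChar c = true := by
    intro c hc
    exact List.all_eq_true.mp hDom c hc
  rw [pvABridge]
  unfold parse_metric_names_py_alt
  have hfun : (fun (names : PySem.Set String) (n : List Char) =>
      PySem.Set.add names (String.ofList
        (if PySem.Chars.endswith n ['_', 'c', 'r', 'e', 'a', 't', 'e', 'd']
         then PySem.List.slice n none (some (-8)) else n))) = pvBAdd := rfl
  rw [hfun]
  unfold D_parse_metric_names_py at hND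
  unfold PySem.Chars.splitlines at hND ⊢
  refine pvFinal _ ?_ prom.toList hcs ?_
  · intro c hc
    simp only []
    have hdom : (((32 ≤ c.toNat ∧ c.toNat ≤ 126) ∨ c.toNat = 9) ∨ c.toNat = 10) ∨ c.toNat = 13 := by
      simpa [pvDomChar, Bool.or_eq_true, Bool.and_eq_true, decide_eq_true_eq] using hc
    unfold pvIsBrk
    rw [pvBeq_toNat c '\n', pvBeq_toNat c '\r']
    rw [show ('\n').toNat = 10 from rfl, show ('\r').toNat = 13 from rfl]
    apply Bool.coe_iff_coe.mp
    simp only [Bool.or_eq_true, decide_eq_true_eq]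
    omega
  · intro l hl
    by_contra hcon
    apply hND
    refine ⟨l, hl, ?_⟩
    have hd : pvDLine l = true := by simpa using hcon
    rw [pvDLine] at hd
    simpa [List.contains_eq_mem] using hd

theorem parse_metric_names_py_changed : Claim_changed_parse_metric_names_py := by
  unfold Claim_changed_parse_metric_names_py
  refine ⟨by decide, by decide, by decide, ?_, by decide⟩
  show parse_metric_names_py_alt pvDiffWitness_parse_metric_names_py =
    pvDiffWitnessOut_parse_metric_names_py.2
  unfold parse_metric_names_py_alt pvDiffWitness_parse_metric_names_py
  rw [pvAltWitness]
  decide
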